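-- pv_equiv track=rewrite | github.com/Jaiadithya71/AI_Eduthon_TF | backend/app/services/image_service.py | _extract_primary_keyword
-- ===== SOURCE A (Python) =====
-- from typing import Optional, List, Set
--
-- def _extract_primary_keyword(text: str) -> Optional[str]:
--     text = (text or "").lower()
--     tokens = [t for t in text.replace("/", " ").split() if t.isalpha()]
--
--     stop = {
--         "the",
--         "and",
--         "of",
--         "for",
--         "in",
--         "to",
--         "a",
--         "an",
--         "on",
--         "with",
--         "introduction",
--         "overview",
--         "diagram",
--         "illustration",
--         "education",
--         "system",
--         "process",
--     }
--
--     filtered = [t for t in tokens if t not in stop]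
--     if not filtered:
--         return None
--
--     filtered.sort(key=len, reverse=True)
--     return filtered[0]
-- ===== SOURCE B (Python) =====
-- from typing import Optional
--
-- _STOP = {
--     "the", "and", "of", "for", "in", "to", "a", "an", "on", "with",
--     "introduction", "overview", "diagram", "illustration",
--     "education", "system", "process",
-- }
--
-- def _extract_primary_keyword(text: str) -> Optional[str]:
--     best = None
--     for t in (text or "").lower().replace("/", " ").split():
--         if t.isalpha() and t not in _STOP:
--             if best is None or len(t) > len(best):
--                 best = t
--     return best
-- ===== Notes on version B (the rewrite author's own statement) =====
-- stated objective: simpler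
-- what changed: Replaces the build-two-filtered-lists then stable-reverse-sort-and-take-head pipeline with a single pass over the tokens that maintains a running best (strict > keeps the first-occurring longest token, matching the stable sort).
import Mathlib
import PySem

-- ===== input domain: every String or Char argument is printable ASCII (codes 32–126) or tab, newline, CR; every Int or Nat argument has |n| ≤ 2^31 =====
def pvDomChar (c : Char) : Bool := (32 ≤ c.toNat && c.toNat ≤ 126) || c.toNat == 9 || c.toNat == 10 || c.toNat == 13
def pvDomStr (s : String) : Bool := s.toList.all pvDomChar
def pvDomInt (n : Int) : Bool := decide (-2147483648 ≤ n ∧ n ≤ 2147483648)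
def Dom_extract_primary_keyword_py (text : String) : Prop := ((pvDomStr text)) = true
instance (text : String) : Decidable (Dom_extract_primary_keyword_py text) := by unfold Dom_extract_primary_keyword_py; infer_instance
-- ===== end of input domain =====

-- B is a single pass keeping a running best (strict > ⇒ first-occurring longest wins, matching
-- A's stable reverse sort); same return value, no side effects in either version.

-- the stop-word set (shared literal constant of both Pythons)
def pvStop : List String :=
  ["the", "and", "of", "for", "in", "to", "a", "an", "on", "with",
   "introduction", "overview", "diagram", "illustration",
   "education", "system", "process"]

-- ===== PORT A =====
-- lowercase; replace '/'→' '; split; keep alphabetic; drop stop words;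
-- None if empty, else stable sort by length descending and take the first.
def extract_primary_keyword_py (text : String) : Option String :=
  let lowered := PySem.Str.lower text
  let tokens := (PySem.Str.split₀ (PySem.Str.replace lowered "/" " ")).filter
    (fun t => PySem.Str.strIsalpha t)
  let filtered := tokens.filter (fun t => !(pvStop.contains t))
  if filtered.isEmpty then none
  else (PySem.List.sorted filtered (fun t => PySem.Str.len t) true).head?

-- ===== PORT B =====
-- the loop body of B: skip unless alphabetic non-stopword; replace best only on strictly greater length
def pvBest (best : Option String) (t : String) : Option String :=
  if PySem.Str.strIsalpha t && !(pvStop.contains t) then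
    match best with
    | none => some t
    | some b => if PySem.Str.len b < PySem.Str.len t then some t else some b
  else best

-- one pass with a running best
def extract_primary_keyword_py_alt (text : String) : Option String :=
  (PySem.Str.split₀ (PySem.Str.replace (PySem.Str.lower text) "/" " ")).foldl pvBest none

-- ===== PRECONDITION & SPEC =====
def Spec_extract_primary_keyword_py (text : String) (out : Option String) : Prop := out = extract_primary_keyword_py_alt text
instance (text : String) (out : Option String) : Decidable (Spec_extract_primary_keyword_py text out) := by unfold Spec_extract_primary_keyword_py; infer_instance

-- ===== CLAIM (what is proved, stated in full; the proofs are below) =====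
def Claim_equal_extract_primary_keyword_py : Prop := ∀ (text : String), Dom_extract_primary_keyword_py text → Spec_extract_primary_keyword_py text (extract_primary_keyword_py text)

-- ===== LEMMAS AND PROOFS =====


theorem head?_insertBy_rev {α κ : Type} [LinearOrder κ] (key : α → κ) (x : α) (l : List α) :
    (PySem.List.insertBy (fun a b => decide (key b < key a)) x l).head? =
      some (match l with
            | [] => x
            | y :: _ => if key y < key x then x else y) := by
  cases l with
  | nil => rfl
  | cons y ys =>
    simp only [PySem.List.insertBy]
    split_ifs with h <;> simp_all

-- A's pipeline on an arbitrary token list equals B's single guarded fold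
theorem pv_core (ts : List String) :
    (if (ts.filter (fun t => PySem.Str.strIsalpha t && !(pvStop.contains t))).isEmpty
       then (none : Option String)
     else (PySem.List.sorted (ts.filter (fun t => PySem.Str.strIsalpha t && !(pvStop.contains t)))
             (fun t => PySem.Str.len t) true).head?)
    = ts.foldl pvBest none := by
  induction ts using List.reverseRecOn with
  | nil => rfl
  | append_singleton ts x ih =>
    rw [List.foldl_append, List.foldl_cons, List.foldl_nil, ← ih, List.filter_append]
    by_cases hx : (PySem.Str.strIsalpha x && !(pvStop.contains x)) = true
    · have hfa : List.filter (fun t => PySem.Str.strIsalpha t && !(pvStop.contains t)) [x] = [x] := by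
        simp only [List.filter_cons, List.filter_nil, hx, if_true]
      rw [hfa]
      have hne : ¬ (List.filter (fun t => PySem.Str.strIsalpha t && !(pvStop.contains t)) ts
          ++ [x]).isEmpty = true := by simp
      rw [if_neg hne,
          PySem.List.sorted_rev_eq_foldl_insertBy, List.foldl_append, List.foldl_cons,
          List.foldl_nil, ← PySem.List.sorted_rev_eq_foldl_insertBy,
          head?_insertBy_rev (fun t => PySem.Str.len t) x]
      cases hs : PySem.List.sorted
          (List.filter (fun t => PySem.Str.strIsalpha t && !(pvStop.contains t)) ts)
          (fun t => PySem.Str.len t) true with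
      | nil =>
        have h0 : List.filter (fun t => PySem.Str.strIsalpha t && !(pvStop.contains t)) ts = [] :=
          (PySem.List.sorted_eq_nil_iff _ _ _).mp hs
        rw [h0]
        simp only [List.isEmpty_nil, if_true, pvBest, hx]
      | cons m t =>
        have hne2 : ¬ (List.filter (fun t => PySem.Str.strIsalpha t && !(pvStop.contains t)) ts).isEmpty
            = true := by
          intro h
          rw [List.isEmpty_iff.mp h] at hs
          exact absurd hs (by simp [PySem.List.sorted])
        rw [if_neg hne2]
        simp only [List.head?_cons, pvBest, hx, if_true]
        split_ifs <;> rfl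
    · have hfa : List.filter (fun t => PySem.Str.strIsalpha t && !(pvStop.contains t)) [x] = [] := by
        simp only [List.filter_cons, List.filter_nil, hx]; rfl
      rw [hfa, List.append_nil]
      simp only [pvBest, if_neg hx]

theorem extract_primary_keyword_py_eq (text : String) :
    extract_primary_keyword_py text = extract_primary_keyword_py_alt text := by
  unfold extract_primary_keyword_py extract_primary_keyword_py_alt
  simp only [List.filter_filter]
  rw [List.filter_congr (fun t _ => Bool.and_comm (!pvStop.contains t) (PySem.Str.strIsalpha t))]
  exact pv_core _

-- ===== VERDICT (by name: the statement is the Claim_ definition above) =====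
theorem extract_primary_keyword_py_spec : Claim_equal_extract_primary_keyword_py := by
  intro text _
  exact extract_primary_keyword_py_eq text
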